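-- pv_equiv track=rewrite | github.com/MilitelloN/Trivium | trivium-grupo03.py | trivium
-- ===== SOURCE A (Python) =====
-- def getBitsFrom(key):
--     bits = ''.join(format(ord(caracter), '08b') for caracter in key)
--     return bits.zfill(80) if len(bits) < 80 else bits[:80]
--
-- def trivium(key,iv,keystreamSize):
--     keyBits = getBitsFrom(key)
--     ivBits = getBitsFrom(iv)
--
--     # 80 keyBits + 13 0's + 80 ivbits + 4 0's + 108 0's + 3 1's = 288
--     stateS = keyBits + "0"*13 + ivBits + "0"*112 + "1"*3
--
--     state = []
--     for bit in stateS: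
--         state.append(int(bit,2))
--
--     for round in range (0,4 * 288):
--         t1 = state[65] ^ state[90] & state[91] ^ state[92] ^ state[170]
--         t2 = state[161] ^ state[174] & state[175] ^ state[176]  ^ state[263]
--         t3 = state[242] ^ state[285] & state[286] ^ state[287]^ state[68]
--
--         state.pop()
--         state.insert(0,0)
--
--         state[0] = t3
--         state[93] = t1
--         state[177] = t2
--
--     keyStream = ""
--     round = 0
--     while(round < keystreamSize):
--         t1 = state[65] ^ state[92]
--         t2 = state[161] ^ state[176]
--         t3 = state[242] ^ state[287]
--
--         keyStream += str(t1 ^ t2 ^ t3)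
--
--         t1 = t1 ^ state[90] & state[91] ^ state[170]
--         t2 = t2 ^ state[174] & state[175] ^ state[263]
--         t3 = t3 ^ state[285] & state[286] ^ state[68]
--
--         state.pop()
--         state.insert(0,0)
--
--         state[0] = t3
--         state[93] = t1
--         state[177] = t2
--         round += 1
--
--     return keyStream
-- ===== SOURCE B (Python) =====
-- def getBitsFrom(key):
--     bits = ''.join(format(ord(caracter), '08b') for caracter in key)
--     return bits.zfill(80) if len(bits) < 80 else bits[:80]
--
-- def _step(A, B, C):
--     # one Trivium round on the three shift registers; returns the new registers
--     t1 = A[65] ^ A[90] & A[91] ^ A[92] ^ B[77]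
--     t2 = B[68] ^ B[81] & B[82] ^ B[83] ^ C[86]
--     t3 = C[65] ^ C[108] & C[109] ^ C[110] ^ A[68]
--     return [t3] + A[:-1], [t1] + B[:-1], [t2] + C[:-1]
--
-- def trivium(key, iv, keystreamSize):
--     seed = getBitsFrom(key) + "0" * 13 + getBitsFrom(iv) + "0" * 112 + "1" * 3
--     bits = [int(b, 2) for b in seed]
--     A, B, C = bits[0:93], bits[93:177], bits[177:288]
--     for _ in range(4 * 288):
--         A, B, C = _step(A, B, C)
--     out = []
--     for _ in range(max(keystreamSize, 0)):
--         out.append(str(A[65] ^ A[92] ^ B[68] ^ B[83] ^ C[65] ^ C[110]))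
--         A, B, C = _step(A, B, C)
--     return ''.join(out)
-- ===== Notes on version B (the rewrite author's own statement) =====
-- stated objective: alternative
-- what changed: Replaces the single 288-entry state list mutated by pop/insert/index-assignments with three independent shift registers (93/84/111 bits) advanced by one shared step function used for both the 1152 warm-up rounds and the output rounds, building the keystream as a list joined at the end.
import Mathlib
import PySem

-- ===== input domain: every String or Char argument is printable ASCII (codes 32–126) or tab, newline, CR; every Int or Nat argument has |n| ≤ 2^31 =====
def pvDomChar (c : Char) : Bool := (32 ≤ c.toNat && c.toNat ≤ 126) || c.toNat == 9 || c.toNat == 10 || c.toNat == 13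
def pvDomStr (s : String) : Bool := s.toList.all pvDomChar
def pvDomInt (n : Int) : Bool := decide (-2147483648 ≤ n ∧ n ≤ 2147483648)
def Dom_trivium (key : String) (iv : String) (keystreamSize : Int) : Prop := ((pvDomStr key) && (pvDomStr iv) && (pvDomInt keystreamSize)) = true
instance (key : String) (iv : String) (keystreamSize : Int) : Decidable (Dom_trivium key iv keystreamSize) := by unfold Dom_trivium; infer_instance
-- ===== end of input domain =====

set_option maxRecDepth 100000


-- B replaces the single 288-entry state list with three independent shift registers
-- advanced by one shared step function (alternative decomposition, same cost).

-- ===== PORT A =====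
-- shared helper: getBitsFrom (identical in Source A and Source B).
-- format(ord(c), '08b') = binary digits of ord(c) zero-padded to width 8
def pvBits8 (c : Char) : List Char :=
  PySem.Chars.zfill (PySem.Int.toBinChars (c.toNat : Int)) 8

def getBitsFromPort (s : String) : List Char :=
  let bits := s.toList.flatMap pvBits8
  if bits.length < 80 then PySem.Chars.zfill bits 80 else PySem.List.slice bits none (some 80)

-- int(bit, 2) applied to the characters of stateS, each of which is '0' or '1'
def pvBitInt (c : Char) : Int := if c = '1' then 1 else 0

-- list indexing state[i]; every index used is in range, so the IndexError case is dead
def pvG (s : List Int) (i : Int) : Int := (PySem.List.pyGet? s i).getD 0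

-- body of A's initialisation loop: pop, insert(0,0), three index assignments
def triviumRoundA (s : List Int) : List Int :=
  let t1 := PySem.Int.bxor (PySem.Int.bxor (PySem.Int.bxor (pvG s 65) (PySem.Int.band (pvG s 90) (pvG s 91))) (pvG s 92)) (pvG s 170)
  let t2 := PySem.Int.bxor (PySem.Int.bxor (PySem.Int.bxor (pvG s 161) (PySem.Int.band (pvG s 174) (pvG s 175))) (pvG s 176)) (pvG s 263)
  let t3 := PySem.Int.bxor (PySem.Int.bxor (PySem.Int.bxor (pvG s 242) (PySem.Int.band (pvG s 285) (pvG s 286))) (pvG s 287)) (pvG s 68)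
  -- state.pop() discards the last element; the list is never empty here
  (((PySem.List.insert s.dropLast 0 0).set 0 t3).set 93 t1).set 177 t2

-- A's while loop, by the number of its iterations (round counts 0,1,… up to keystreamSize)
def triviumOutA : Nat → List Int → String → String
  | 0, _, acc => acc
  | Nat.succ n, s, acc =>
    let t1 := PySem.Int.bxor (pvG s 65) (pvG s 92)
    let t2 := PySem.Int.bxor (pvG s 161) (pvG s 176)
    let t3 := PySem.Int.bxor (pvG s 242) (pvG s 287)
    let acc := acc ++ PySem.Int.toStr (PySem.Int.bxor (PySem.Int.bxor t1 t2) t3)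
    let t1 := PySem.Int.bxor (PySem.Int.bxor t1 (PySem.Int.band (pvG s 90) (pvG s 91))) (pvG s 170)
    let t2 := PySem.Int.bxor (PySem.Int.bxor t2 (PySem.Int.band (pvG s 174) (pvG s 175))) (pvG s 263)
    let t3 := PySem.Int.bxor (PySem.Int.bxor t3 (PySem.Int.band (pvG s 285) (pvG s 286))) (pvG s 68)
    triviumOutA n ((((PySem.List.insert s.dropLast 0 0).set 0 t3).set 93 t1).set 177 t2) acc

def trivium (key : String) (iv : String) (keystreamSize : Int) : String :=
  let keyBits := getBitsFromPort key
  let ivBits := getBitsFromPort iv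
  let stateS := keyBits ++ (List.replicate 13 '0' ++ (ivBits ++ (List.replicate 112 '0' ++ List.replicate 3 '1')))
  let state := stateS.map pvBitInt
  let state := (PySem.List.pyRange 0 (4 * 288) 1).foldl (fun s _ => triviumRoundA s) state
  triviumOutA keystreamSize.toNat state ""

-- ===== PORT B =====
-- one Trivium round on the three shift registers (Source B's _step)
def pvStepAlt (t : List Int × List Int × List Int) : List Int × List Int × List Int :=
  let a := t.1; let b := t.2.1; let c := t.2.2
  let t1 := PySem.Int.bxor (PySem.Int.bxor (PySem.Int.bxor (pvG a 65) (PySem.Int.band (pvG a 90) (pvG a 91))) (pvG a 92)) (pvG b 77)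
  let t2 := PySem.Int.bxor (PySem.Int.bxor (PySem.Int.bxor (pvG b 68) (PySem.Int.band (pvG b 81) (pvG b 82))) (pvG b 83)) (pvG c 86)
  let t3 := PySem.Int.bxor (PySem.Int.bxor (PySem.Int.bxor (pvG c 65) (PySem.Int.band (pvG c 108) (pvG c 109))) (pvG c 110)) (pvG a 68)
  (t3 :: PySem.List.slice a none (some (-1)),
   t1 :: PySem.List.slice b none (some (-1)),
   t2 :: PySem.List.slice c none (some (-1)))

-- Source B's output loop: collect str(z) for each round, registers advance by _step
def triviumOutAlt : Nat → List Int × List Int × List Int → List String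
  | 0, _ => []
  | Nat.succ n, t =>
    let a := t.1; let b := t.2.1; let c := t.2.2
    let z := PySem.Int.bxor (PySem.Int.bxor (PySem.Int.bxor (PySem.Int.bxor (PySem.Int.bxor (pvG a 65) (pvG a 92)) (pvG b 68)) (pvG b 83)) (pvG c 65)) (pvG c 110)
    PySem.Int.toStr z :: triviumOutAlt n (pvStepAlt (a, b, c))

def trivium_alt (key : String) (iv : String) (keystreamSize : Int) : String :=
  let seed := getBitsFromPort key ++ (List.replicate 13 '0' ++ (getBitsFromPort iv ++ (List.replicate 112 '0' ++ List.replicate 3 '1')))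
  let bits := seed.map pvBitInt
  let regs := (PySem.List.slice bits (some 0) (some 93),
               PySem.List.slice bits (some 93) (some 177),
               PySem.List.slice bits (some 177) (some 288))
  let regs := (PySem.List.pyRange 0 (4 * 288) 1).foldl (fun t _ => pvStepAlt t) regs
  PySem.Str.join "" (triviumOutAlt (max keystreamSize 0).toNat regs)

-- ===== PRECONDITION & SPEC =====
def Spec_trivium (key : String) (iv : String) (keystreamSize : Int) (out : String) : Prop := out = trivium_alt key iv keystreamSize
instance (key : String) (iv : String) (keystreamSize : Int) (out : String) : Decidable (Spec_trivium key iv keystreamSize out) := by unfold Spec_trivium; infer_instance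

-- ===== CLAIM (what is proved, stated in full; the proofs are below) =====
def Claim_equal_trivium : Prop := ∀ (key : String) (iv : String) (keystreamSize : Int), Dom_trivium key iv keystreamSize → Spec_trivium key iv keystreamSize (trivium key iv keystreamSize)

-- ===== LEMMAS AND PROOFS =====

-- all entries of a register are bits (0 or 1)
def PvBits (l : List Int) : Prop := ∀ x ∈ l, x = 0 ∨ x = 1

-- the joint invariant carried through both loops
def PvInv (t : List Int × List Int × List Int) : Prop :=
  t.1.length = 93 ∧ t.2.1.length = 84 ∧ t.2.2.length = 111 ∧ PvBits t.1 ∧ PvBits t.2.1 ∧ PvBits t.2.2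

lemma pvG_append_left (xs ys : List Int) (i : Int) (h0 : 0 ≤ i) (h : i < xs.length) :
    pvG (xs ++ ys) i = pvG xs i := by
  unfold pvG
  rw [PySem.List.pyGet?_of_nonneg _ h0, PySem.List.pyGet?_of_nonneg _ h0,
    List.getElem?_append_left (by omega)]

lemma pvG_append_right (xs ys : List Int) (i : Int) (h : (xs.length : Int) ≤ i) :
    pvG (xs ++ ys) i = pvG ys (i - xs.length) := by
  have h0 : 0 ≤ i := le_trans (by positivity) h
  unfold pvG
  rw [PySem.List.pyGet?_of_nonneg _ h0, PySem.List.pyGet?_of_nonneg _ (by omega),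
    List.getElem?_append_right (by omega)]
  congr 2
  omega

lemma pvG_cat_a (a b c : List Int) (ha : a.length = 93) (i : Int) (h0 : 0 ≤ i) (h : i < 93) :
    pvG (a ++ (b ++ c)) i = pvG a i := by
  rw [pvG_append_left] <;> omega

lemma pvG_cat_b (a b c : List Int) (ha : a.length = 93) (hb : b.length = 84)
    (i j : Int) (h0 : 93 ≤ i) (h : i < 177) (hj : j = i - 93) :
    pvG (a ++ (b ++ c)) i = pvG b j := by
  rw [pvG_append_right _ _ _ (by omega), pvG_append_left _ _ _ (by omega) (by omega), ha, hj]
  all_goals (congr 1 <;> omega)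

lemma pvG_cat_c (a b c : List Int) (ha : a.length = 93) (hb : b.length = 84)
    (i j : Int) (h0 : 177 ≤ i) (hj : j = i - 177) :
    pvG (a ++ (b ++ c)) i = pvG c j := by
  rw [pvG_append_right _ _ _ (by omega), pvG_append_right _ _ _ (by omega), ha, hb, hj]
  all_goals (congr 1 <;> omega)

lemma pvG_bit (l : List Int) (hl : PvBits l) (i : Int) : pvG l i = 0 ∨ pvG l i = 1 := by
  unfold pvG
  cases hg : PySem.List.pyGet? l i with
  | none => simp
  | some x => exact (by simpa using hl x (PySem.List.mem_of_pyGet?_eq_some _ hg))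

lemma bxor_bit {a b : Int} (ha : a = 0 ∨ a = 1) (hb : b = 0 ∨ b = 1) :
    PySem.Int.bxor a b = 0 ∨ PySem.Int.bxor a b = 1 := by
  rcases ha with rfl | rfl <;> rcases hb with rfl | rfl <;> decide

lemma band_bit {a b : Int} (ha : a = 0 ∨ a = 1) (hb : b = 0 ∨ b = 1) :
    PySem.Int.band a b = 0 ∨ PySem.Int.band a b = 1 := by
  rcases ha with rfl | rfl <;> rcases hb with rfl | rfl <;> decide

-- xor right-commutativity on bits
lemma bxor_right_comm {x w m : Int} (hx : x = 0 ∨ x = 1) (hw : w = 0 ∨ w = 1) (hm : m = 0 ∨ m = 1) :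
    PySem.Int.bxor (PySem.Int.bxor x w) m = PySem.Int.bxor (PySem.Int.bxor x m) w := by
  rcases hx with rfl | rfl <;> rcases hw with rfl | rfl <;> rcases hm with rfl | rfl <;> decide

-- the two orders in which A and B accumulate the six-term output xor agree on bits
lemma bxor_six {x1 w1 x2 w2 x3 w3 : Int}
    (h1 : x1 = 0 ∨ x1 = 1) (h2 : w1 = 0 ∨ w1 = 1) (h3 : x2 = 0 ∨ x2 = 1)
    (h4 : w2 = 0 ∨ w2 = 1) (h5 : x3 = 0 ∨ x3 = 1) (h6 : w3 = 0 ∨ w3 = 1) :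
    PySem.Int.bxor (PySem.Int.bxor (PySem.Int.bxor x1 w1) (PySem.Int.bxor x2 w2)) (PySem.Int.bxor x3 w3)
      = PySem.Int.bxor (PySem.Int.bxor (PySem.Int.bxor (PySem.Int.bxor (PySem.Int.bxor x1 w1) x2) w2) x3) w3 := by
  rcases h1 with rfl | rfl <;> rcases h2 with rfl | rfl <;> rcases h3 with rfl | rfl <;>
    rcases h4 with rfl | rfl <;> rcases h5 with rfl | rfl <;> rcases h6 with rfl | rfl <;> decide

-- list.insert(0, v) prepends
lemma pvInsertZero (xs : List Int) (v : Int) : PySem.List.insert xs 0 v = v :: xs := by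
  simp [PySem.List.insert, PySem.List.sliceIndices]

-- the list surgery of one round of A, regrouped into the three registers
lemma pvShiftCat (a b c : List Int) (t1 t2 t3 : Int)
    (ha : a.length = 93) (hb : b.length = 84) (hc : c.length = 111) :
    (((PySem.List.insert (a ++ (b ++ c)).dropLast 0 0).set 0 t3).set 93 t1).set 177 t2
      = (t3 :: a.dropLast) ++ ((t1 :: b.dropLast) ++ (t2 :: c.dropLast)) := by
  rw [pvInsertZero]
  have hc' : c ≠ [] := by intro h; simp [h] at hc
  have hbc : b ++ c ≠ [] := by simp [hc']
  rw [List.dropLast_append_of_ne_nil hbc, List.dropLast_append_of_ne_nil hc']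
  apply List.ext_getElem
  · simp [ha, hb, hc]
  · intro i h1 h2
    simp only [List.getElem_set, List.getElem_cons, List.getElem_append,
      List.getElem_dropLast, List.length_cons, List.length_dropLast, ha, hb]
    split_ifs <;> first | rfl | omega

-- one round of A on the concatenated state is one step of B on the registers
lemma pvRoundCat (a b c : List Int) (ha : a.length = 93) (hb : b.length = 84) (hc : c.length = 111) :
    triviumRoundA (a ++ (b ++ c))
      = (pvStepAlt (a, b, c)).1 ++ ((pvStepAlt (a, b, c)).2.1 ++ (pvStepAlt (a, b, c)).2.2) := by
  unfold triviumRoundA pvStepAlt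
  dsimp only
  rw [pvG_cat_a a b c ha 65 (by norm_num) (by norm_num),
      pvG_cat_a a b c ha 90 (by norm_num) (by norm_num),
      pvG_cat_a a b c ha 91 (by norm_num) (by norm_num),
      pvG_cat_a a b c ha 92 (by norm_num) (by norm_num),
      pvG_cat_a a b c ha 68 (by norm_num) (by norm_num),
      pvG_cat_b a b c ha hb 170 77 (by norm_num) (by norm_num) (by norm_num),
      pvG_cat_b a b c ha hb 161 68 (by norm_num) (by norm_num) (by norm_num),
      pvG_cat_b a b c ha hb 174 81 (by norm_num) (by norm_num) (by norm_num),
      pvG_cat_b a b c ha hb 175 82 (by norm_num) (by norm_num) (by norm_num),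
      pvG_cat_b a b c ha hb 176 83 (by norm_num) (by norm_num) (by norm_num),
      pvG_cat_c a b c ha hb 263 86 (by norm_num) (by norm_num),
      pvG_cat_c a b c ha hb 242 65 (by norm_num) (by norm_num),
      pvG_cat_c a b c ha hb 285 108 (by norm_num) (by norm_num),
      pvG_cat_c a b c ha hb 286 109 (by norm_num) (by norm_num),
      pvG_cat_c a b c ha hb 287 110 (by norm_num) (by norm_num),
      PySem.List.slice_to_neg_one, PySem.List.slice_to_neg_one, PySem.List.slice_to_neg_one]
  exact pvShiftCat a b c _ _ _ ha hb hc

lemma pvBits_cons_dropLast {l : List Int} {x : Int} (hl : PvBits l) (hx : x = 0 ∨ x = 1) :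
    PvBits (x :: l.dropLast) := by
  intro y hy
  rcases List.mem_cons.mp hy with rfl | hy'
  · exact hx
  · exact hl y ((List.dropLast_sublist l).subset hy')

lemma pvStep_inv (t : List Int × List Int × List Int) (h : PvInv t) : PvInv (pvStepAlt t) := by
  obtain ⟨ha, hb, hc, hba, hbb, hbc⟩ := h
  unfold pvStepAlt
  dsimp only
  rw [PySem.List.slice_to_neg_one, PySem.List.slice_to_neg_one, PySem.List.slice_to_neg_one]
  refine ⟨by simp [ha], by simp [hb], by simp [hc], ?_, ?_, ?_⟩
  · exact pvBits_cons_dropLast hba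
      (bxor_bit (bxor_bit (bxor_bit (pvG_bit _ hbc 65) (band_bit (pvG_bit _ hbc 108) (pvG_bit _ hbc 109))) (pvG_bit _ hbc 110)) (pvG_bit _ hba 68))
  · exact pvBits_cons_dropLast hbb
      (bxor_bit (bxor_bit (bxor_bit (pvG_bit _ hba 65) (band_bit (pvG_bit _ hba 90) (pvG_bit _ hba 91))) (pvG_bit _ hba 92)) (pvG_bit _ hbb 77))
  · exact pvBits_cons_dropLast hbc
      (bxor_bit (bxor_bit (bxor_bit (pvG_bit _ hbb 68) (band_bit (pvG_bit _ hbb 81) (pvG_bit _ hbb 82))) (pvG_bit _ hbb 83)) (pvG_bit _ hbc 86))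

-- the two initialisation folds stay related
lemma pvFold_sim (l : List Int) (t : List Int × List Int × List Int) (h : PvInv t) :
    l.foldl (fun s _ => triviumRoundA s) (t.1 ++ (t.2.1 ++ t.2.2))
        = ((l.foldl (fun t _ => pvStepAlt t) t).1 ++ ((l.foldl (fun t _ => pvStepAlt t) t).2.1 ++ (l.foldl (fun t _ => pvStepAlt t) t).2.2))
      ∧ PvInv (l.foldl (fun t _ => pvStepAlt t) t) := by
  induction l generalizing t with
  | nil => exact ⟨rfl, h⟩
  | cons x xs ih =>
    simp only [List.foldl_cons]
    rw [pvRoundCat t.1 t.2.1 t.2.2 h.1 h.2.1 h.2.2.1]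
    exact ih (pvStepAlt t) (pvStep_inv t h)

lemma pvJoin_cons (x : String) (l : List String) :
    PySem.Str.join "" (x :: l) = x ++ PySem.Str.join "" l := by
  simp [PySem.Str.join, PySem.Chars.join, List.intercalate]
  cases l <;> simp

-- the keystream bit emitted by A equals the one emitted by B
lemma pvZCat (a b c : List Int) (h : PvInv (a, b, c)) :
    PySem.Int.bxor (PySem.Int.bxor (PySem.Int.bxor (pvG (a ++ (b ++ c)) 65) (pvG (a ++ (b ++ c)) 92)) (PySem.Int.bxor (pvG (a ++ (b ++ c)) 161) (pvG (a ++ (b ++ c)) 176))) (PySem.Int.bxor (pvG (a ++ (b ++ c)) 242) (pvG (a ++ (b ++ c)) 287))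
      = PySem.Int.bxor (PySem.Int.bxor (PySem.Int.bxor (PySem.Int.bxor (PySem.Int.bxor (pvG a 65) (pvG a 92)) (pvG b 68)) (pvG b 83)) (pvG c 65)) (pvG c 110) := by
  obtain ⟨ha, hb, hc, hba, hbb, hbc⟩ := h
  rw [pvG_cat_a a b c ha 65 (by norm_num) (by norm_num),
      pvG_cat_a a b c ha 92 (by norm_num) (by norm_num),
      pvG_cat_b a b c ha hb 161 68 (by norm_num) (by norm_num) (by norm_num),
      pvG_cat_b a b c ha hb 176 83 (by norm_num) (by norm_num) (by norm_num),
      pvG_cat_c a b c ha hb 242 65 (by norm_num) (by norm_num),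
      pvG_cat_c a b c ha hb 287 110 (by norm_num) (by norm_num)]
  exact bxor_six (pvG_bit _ hba 65) (pvG_bit _ hba 92) (pvG_bit _ hbb 68)
    (pvG_bit _ hbb 83) (pvG_bit _ hbc 65) (pvG_bit _ hbc 110)

-- the state update of A's output loop is one step of B (the feedback words are
-- accumulated in a different xor order, equal on bits)
lemma pvOutRoundCat (a b c : List Int) (h : PvInv (a, b, c)) :
    (((PySem.List.insert (a ++ (b ++ c)).dropLast 0 0).set 0
        (PySem.Int.bxor (PySem.Int.bxor (PySem.Int.bxor (pvG (a ++ (b ++ c)) 242) (pvG (a ++ (b ++ c)) 287)) (PySem.Int.band (pvG (a ++ (b ++ c)) 285) (pvG (a ++ (b ++ c)) 286))) (pvG (a ++ (b ++ c)) 68))).set 93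
        (PySem.Int.bxor (PySem.Int.bxor (PySem.Int.bxor (pvG (a ++ (b ++ c)) 65) (pvG (a ++ (b ++ c)) 92)) (PySem.Int.band (pvG (a ++ (b ++ c)) 90) (pvG (a ++ (b ++ c)) 91))) (pvG (a ++ (b ++ c)) 170))).set 177
        (PySem.Int.bxor (PySem.Int.bxor (PySem.Int.bxor (pvG (a ++ (b ++ c)) 161) (pvG (a ++ (b ++ c)) 176)) (PySem.Int.band (pvG (a ++ (b ++ c)) 174) (pvG (a ++ (b ++ c)) 175))) (pvG (a ++ (b ++ c)) 263))
      = (pvStepAlt (a, b, c)).1 ++ ((pvStepAlt (a, b, c)).2.1 ++ (pvStepAlt (a, b, c)).2.2) := by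
  obtain ⟨ha, hb, hc, hba, hbb, hbc⟩ := h
  unfold pvStepAlt
  dsimp only
  rw [pvG_cat_a a b c ha 65 (by norm_num) (by norm_num),
      pvG_cat_a a b c ha 90 (by norm_num) (by norm_num),
      pvG_cat_a a b c ha 91 (by norm_num) (by norm_num),
      pvG_cat_a a b c ha 92 (by norm_num) (by norm_num),
      pvG_cat_a a b c ha 68 (by norm_num) (by norm_num),
      pvG_cat_b a b c ha hb 170 77 (by norm_num) (by norm_num) (by norm_num),
      pvG_cat_b a b c ha hb 161 68 (by norm_num) (by norm_num) (by norm_num),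
      pvG_cat_b a b c ha hb 174 81 (by norm_num) (by norm_num) (by norm_num),
      pvG_cat_b a b c ha hb 175 82 (by norm_num) (by norm_num) (by norm_num),
      pvG_cat_b a b c ha hb 176 83 (by norm_num) (by norm_num) (by norm_num),
      pvG_cat_c a b c ha hb 263 86 (by norm_num) (by norm_num),
      pvG_cat_c a b c ha hb 242 65 (by norm_num) (by norm_num),
      pvG_cat_c a b c ha hb 285 108 (by norm_num) (by norm_num),
      pvG_cat_c a b c ha hb 286 109 (by norm_num) (by norm_num),
      pvG_cat_c a b c ha hb 287 110 (by norm_num) (by norm_num),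
      PySem.List.slice_to_neg_one, PySem.List.slice_to_neg_one, PySem.List.slice_to_neg_one,
      bxor_right_comm (pvG_bit _ hba 65) (pvG_bit _ hba 92) (band_bit (pvG_bit _ hba 90) (pvG_bit _ hba 91)),
      bxor_right_comm (pvG_bit _ hbb 68) (pvG_bit _ hbb 83) (band_bit (pvG_bit _ hbb 81) (pvG_bit _ hbb 82)),
      bxor_right_comm (pvG_bit _ hbc 65) (pvG_bit _ hbc 110) (band_bit (pvG_bit _ hbc 108) (pvG_bit _ hbc 109))]
  exact pvShiftCat a b c _ _ _ ha hb hc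

-- the output loops agree
lemma pvOut_eq (n : Nat) : ∀ (t : List Int × List Int × List Int) (acc : String), PvInv t →
    triviumOutA n (t.1 ++ (t.2.1 ++ t.2.2)) acc = acc ++ PySem.Str.join "" (triviumOutAlt n t) := by
  induction n with
  | zero =>
    intro t acc _
    simp [triviumOutA, triviumOutAlt, PySem.Str.join, PySem.Chars.join, List.intercalate]
  | succ n ih =>
    rintro ⟨a, b, c⟩ acc h
    simp only [triviumOutA, triviumOutAlt]
    rw [pvJoin_cons, ← String.append_assoc, pvZCat a b c h, pvOutRoundCat a b c h]
    exact ih (pvStepAlt (a, b, c)) _ (pvStep_inv _ h)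

lemma length_getBitsFromPort (s : String) : (getBitsFromPort s).length = 80 := by
  unfold getBitsFromPort
  dsimp only
  split
  · rw [PySem.Chars.length_zfill]; omega
  · rw [PySem.List.slice_to _ (by omega)]
    simp only [List.length_take]
    omega

lemma pvMain (key iv : String) (ks : Int) : trivium key iv ks = trivium_alt key iv ks := by
  unfold trivium trivium_alt
  dsimp only
  have hlen : ((getBitsFromPort key ++ (List.replicate 13 '0' ++ (getBitsFromPort iv ++ (List.replicate 112 '0' ++ List.replicate 3 '1')))).map pvBitInt).length = 288 := by
    simp [length_getBitsFromPort]
  set bits := (getBitsFromPort key ++ (List.replicate 13 '0' ++ (getBitsFromPort iv ++ (List.replicate 112 '0' ++ List.replicate 3 '1')))).map pvBitInt with hbits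
  have hslice1 : PySem.List.slice bits (some 0) (some 93) = bits.take 93 := by
    rw [PySem.List.slice_toNat _ (by norm_num) (by norm_num)]
    norm_num [Int.toNat]
  have hslice2 : PySem.List.slice bits (some 93) (some 177) = (bits.drop 93).take 84 := by
    rw [PySem.List.slice_toNat _ (by norm_num) (by norm_num)]
    norm_num [Int.toNat]
  have hslice3 : PySem.List.slice bits (some 177) (some 288) = bits.drop 177 := by
    rw [PySem.List.slice_toNat _ (by norm_num) (by norm_num)]
    norm_num [Int.toNat]
    omega
  have hcat : bits.take 93 ++ ((bits.drop 93).take 84 ++ bits.drop 177) = bits := by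
    have h84 : (bits.drop 93).drop 84 = bits.drop 177 := by
      rw [List.drop_drop]
    rw [← h84, List.take_append_drop, List.take_append_drop]
  have hbit : PvBits bits := by
    intro x hx
    rcases List.mem_map.mp hx with ⟨ch, _, rfl⟩
    unfold pvBitInt
    split
    · right; rfl
    · left; rfl
  have hinv : PvInv (bits.take 93, (bits.drop 93).take 84, bits.drop 177) := by
    refine ⟨by simp [hlen], by simp [hlen], by simp [hlen], ?_, ?_, ?_⟩
    · exact fun x hx => hbit x (List.mem_of_mem_take hx)
    · exact fun x hx => hbit x (List.mem_of_mem_drop (List.mem_of_mem_take hx))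
    · exact fun x hx => hbit x (List.mem_of_mem_drop hx)
  rw [hslice1, hslice2, hslice3]
  have hfold := pvFold_sim (PySem.List.pyRange 0 (4 * 288) 1)
    (bits.take 93, (bits.drop 93).take 84, bits.drop 177) hinv
  have hfuel : (max ks 0).toNat = ks.toNat := by
    rcases le_total ks 0 with h | h
    · rw [max_eq_right h]; omega
    · rw [max_eq_left h]
  rw [hfuel]
  calc triviumOutA ks.toNat ((PySem.List.pyRange 0 (4 * 288) 1).foldl (fun s _ => triviumRoundA s) bits) ""
      = triviumOutA ks.toNat ((PySem.List.pyRange 0 (4 * 288) 1).foldl (fun s _ => triviumRoundA s) (bits.take 93 ++ ((bits.drop 93).take 84 ++ bits.drop 177))) "" := by rw [hcat]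
    _ = "" ++ PySem.Str.join "" (triviumOutAlt ks.toNat ((PySem.List.pyRange 0 (4 * 288) 1).foldl (fun t _ => pvStepAlt t) (bits.take 93, (bits.drop 93).take 84, bits.drop 177))) := by
        rw [hfold.1]
        exact pvOut_eq ks.toNat _ "" hfold.2
    _ = PySem.Str.join "" (triviumOutAlt ks.toNat ((PySem.List.pyRange 0 (4 * 288) 1).foldl (fun t _ => pvStepAlt t) (bits.take 93, (bits.drop 93).take 84, bits.drop 177))) := String.empty_append

-- ===== VERDICT (by name: the statement is the Claim_ definition above) =====
theorem trivium_spec : Claim_equal_trivium := by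
  intro key iv ks _
  unfold Spec_trivium
  exact pvMain key iv ks
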